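-- pv_equiv track=rewrite | github.com/AleFEMac/PDDLParser | old_code/old_code.py | max_similitude_coup
-- ===== SOURCE A (Python) =====
-- def max_similitude_coup(ap):
--
--     occ_dict = {}
--
--     for d in ap:
--         cur_empty = 0
--         for i in d:
--             if d[i] == '':
--                 cur_empty += 1
--         if cur_empty not in occ_dict:
--             occ_dict[cur_empty] = []
--         if d not in occ_dict[cur_empty]:
--             occ_dict[cur_empty].append(d)
--
--     return occ_dict[min(list(occ_dict.keys()))]
-- ===== SOURCE B (Python) =====
-- def max_similitude_coup(ap):
--     counts = [list(d.values()).count('') for d in ap]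
--     m = min(counts)
--     res = []
--     for d, c in zip(ap, counts):
--         if c == m and d not in res:
--             res.append(d)
--     return res
-- ===== Notes on version B (the rewrite author's own statement) =====
-- stated objective: simpler
-- what changed: Instead of building a full count->group dict table and then indexing it at the min key, B computes the list of empty-value counts, takes its minimum, and does one filtering pass collecting (order-preserving, deduplicated) exactly the dicts whose count equals the minimum.
import Mathlib
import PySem

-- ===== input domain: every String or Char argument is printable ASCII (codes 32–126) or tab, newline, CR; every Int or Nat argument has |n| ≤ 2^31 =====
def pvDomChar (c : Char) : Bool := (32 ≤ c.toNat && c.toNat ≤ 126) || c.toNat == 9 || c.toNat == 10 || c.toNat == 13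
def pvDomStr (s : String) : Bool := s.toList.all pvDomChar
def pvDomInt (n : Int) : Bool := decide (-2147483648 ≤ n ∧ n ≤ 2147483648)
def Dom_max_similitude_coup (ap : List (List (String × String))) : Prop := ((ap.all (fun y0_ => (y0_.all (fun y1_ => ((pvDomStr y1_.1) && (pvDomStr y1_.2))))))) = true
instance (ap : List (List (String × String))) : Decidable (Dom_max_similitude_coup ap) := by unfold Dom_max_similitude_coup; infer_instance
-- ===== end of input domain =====

-- B replaces A's full count→group dict table by computing the counts, their minimum, and one
-- deduplicating filter pass that builds only the minimal group (objective: simpler).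

-- ===== PORT A =====
-- Python dict '==' ignores insertion order: 'd not in <list of dicts>' is ported with this
-- order-insensitive dict equality (exact for association lists with distinct keys, as Pre_ requires).
def pyDictEq (d e : List (String × String)) : Bool :=
  d.all (fun p => (PySem.Dict.mk e).get? p.1 == some p.2) &&
  e.all (fun p => (PySem.Dict.mk d).get? p.1 == some p.2)

def pyMemD (d : List (String × String)) (l : List (List (String × String))) : Bool :=
  l.any (fun e => pyDictEq d e)

-- 'cur_empty': for i in d: if d[i] == '': cur_empty += 1   (d[i] = dict lookup)
def pvCountA (d : List (String × String)) : Int :=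
  d.foldl (fun c p => if (PySem.Dict.mk d).get? p.1 == some "" then c + 1 else c) 0

def pvStepA (occ : PySem.Dict Int (List (List (String × String)))) (d : List (String × String)) :
    PySem.Dict Int (List (List (String × String))) :=
  let c := pvCountA d
  let occ1 := if occ.contains c then occ else occ.insert c []
  let g := occ1.getD c []
  if pyMemD d g then occ1 else occ1.insert c (g ++ [d])

def max_similitude_coup (ap : List (List (String × String))) : List (List (String × String)) :=
  let occ := ap.foldl pvStepA PySem.Dict.empty
  match PySem.List.min? occ.keys (fun k => k) with
  | none => []   -- min([]) raises ValueError; excluded by Pre_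
  | some k => occ.getD k []

-- ===== PORT B =====
def pvCountB (d : List (String × String)) : Int :=
  PySem.List.count (d.map Prod.snd) ""

def max_similitude_coup_alt (ap : List (List (String × String))) : List (List (String × String)) :=
  let counts := ap.map pvCountB
  match PySem.List.min? counts (fun x => x) with
  | none => []   -- min([]) raises ValueError; excluded by Pre_
  | some m =>
    (ap.zip counts).foldl
      (fun res dc => if dc.2 == m && !(pyMemD dc.1 res) then res ++ [dc.1] else res) []

-- ===== PRECONDITION & SPEC =====
-- Pre_ excludes the empty list, on which both A and B raise ValueError (min of an empty sequence),
-- and association lists with duplicate keys, which do not represent any Python dict input of A.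
def Pre_max_similitude_coup (ap : List (List (String × String))) : Prop :=
  ap ≠ [] ∧ ∀ d ∈ ap, (d.map Prod.fst).Nodup
instance (ap : List (List (String × String))) : Decidable (Pre_max_similitude_coup ap) := by
  unfold Pre_max_similitude_coup; infer_instance

def pvWitness_max_similitude_coup : (List (List (String × String))) :=
  [[("a", "")], [("b", "x")]]

def Spec_max_similitude_coup (ap : List (List (String × String))) (out : List (List (String × String))) : Prop := out = max_similitude_coup_alt ap
instance (ap : List (List (String × String))) (out : List (List (String × String))) : Decidable (Spec_max_similitude_coup ap out) := by unfold Spec_max_similitude_coup; infer_instance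

-- ===== CLAIM (what is proved, stated in full; the proofs are below) =====
def Claim_equal_max_similitude_coup : Prop := ∀ (ap : List (List (String × String))), Dom_max_similitude_coup ap → Pre_max_similitude_coup ap → Spec_max_similitude_coup ap (max_similitude_coup ap)

-- ===== LEMMAS AND PROOFS =====

-- the deduplicating filter pass that selects the group with count c, as a fold
def grpF (c : Int) (l : List (List (String × String))) : List (List (String × String)) :=
  l.foldl (fun res d => if pvCountA d == c && !(pyMemD d res) then res ++ [d] else res) []

theorem grpF_const (c : Int) (l : List (List (String × String)))
    (res : List (List (String × String))) (h : ∀ d ∈ l, pvCountA d ≠ c) :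
    l.foldl (fun res d => if pvCountA d == c && !(pyMemD d res) then res ++ [d] else res) res = res := by
  induction l generalizing res with
  | nil => rfl
  | cons d t ih =>
    have hd : pvCountA d ≠ c := h d (by simp)
    rw [List.foldl_cons, if_neg (by simp [hd])]
    exact ih res (fun x hx => h x (by simp [hx]))

theorem grpF_nil_of_not_mem (c : Int) (l : List (List (String × String)))
    (h : c ∉ l.map pvCountA) : grpF c l = [] := by
  apply grpF_const
  intro d hd he
  exact h (by simpa [he] using List.mem_map_of_mem (f := pvCountA) hd)

theorem dictInv (l : List (List (String × String))) (c : Int) :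
    (l.foldl pvStepA PySem.Dict.empty).get? c =
      if c ∈ l.map pvCountA then some (grpF c l) else none := by
  induction l using List.reverseRecOn generalizing c with
  | nil => simp [PySem.Dict.get?_empty]
  | append_singleton l d ih =>
    rw [List.foldl_append, List.foldl_cons, List.foldl_nil]
    set F := l.foldl pvStepA PySem.Dict.empty with hF
    have hc0 := ih (pvCountA d)
    have hcontains : F.contains (pvCountA d) = decide (pvCountA d ∈ l.map pvCountA) := by
      rw [PySem.Dict.contains_eq_isSome_get?, hc0]
      by_cases h : pvCountA d ∈ l.map pvCountA <;> simp [h]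
    have hgrp : grpF c (l ++ [d]) =
        if pvCountA d == c && !(pyMemD d (grpF c l)) then grpF c l ++ [d] else grpF c l := by
      unfold grpF; rw [List.foldl_append]; rfl
    unfold pvStepA
    dsimp only
    by_cases hmem : pvCountA d ∈ l.map pvCountA
    · rw [hcontains]
      simp only [hmem, decide_true, if_true]
      have hget : F.getD (pvCountA d) [] = grpF (pvCountA d) l := by
        rw [PySem.Dict.getD_eq_get?_getD, hc0, if_pos hmem]; rfl
      rw [hget]
      by_cases hdup : pyMemD d (grpF (pvCountA d) l)
      · simp only [hdup, if_true]
        rw [ih c, hgrp]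
        by_cases hce : pvCountA d = c
        · subst hce; simp [hdup, hmem]
        · simp [hce, Ne.symm hce]
      · simp only [hdup, if_false, Bool.false_eq_true]
        rw [PySem.Dict.get?_insert, ih c, hgrp]
        by_cases hce : c = pvCountA d
        · subst hce; simp [hdup, hmem]
        · simp [hce, Ne.symm hce]
    · rw [hcontains]
      simp only [hmem, decide_false, Bool.false_eq_true, if_false]
      have hget : (F.insert (pvCountA d) []).getD (pvCountA d) []
          = ([] : List (List (String × String))) := by
        rw [PySem.Dict.getD_eq_get?_getD, PySem.Dict.get?_insert_self]; rfl
      rw [hget]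
      have hnil : grpF (pvCountA d) l = [] := grpF_nil_of_not_mem _ _ hmem
      have hnomem : pyMemD d ([] : List (List (String × String))) = false := rfl
      simp only [hnomem, if_false, Bool.false_eq_true, List.nil_append]
      rw [PySem.Dict.get?_insert, PySem.Dict.get?_insert, ih c, hgrp]
      by_cases hce : c = pvCountA d
      · subst hce; simp [hnil, hmem, hnomem]
      · simp [hce, Ne.symm hce]

theorem mem_keys_iff (l : List (List (String × String))) (c : Int) :
    c ∈ (l.foldl pvStepA PySem.Dict.empty).keys ↔ c ∈ l.map pvCountA := by
  rw [← not_iff_not, ← PySem.Dict.get?_eq_none_iff_not_mem_keys, dictInv]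
  by_cases h : c ∈ l.map pvCountA <;> simp [h]

theorem min?_eq_of_mem_iff (l1 l2 : List Int) (h : ∀ x, x ∈ l1 ↔ x ∈ l2) :
    PySem.List.min? l1 (fun x => x) = PySem.List.min? l2 (fun x => x) := by
  rcases h1 : PySem.List.min? l1 (fun x => x) with _ | m1
  · have : l1 = [] := (PySem.List.min?_eq_none_iff _ _).mp h1
    subst this
    have : l2 = [] := by
      cases l2 with
      | nil => rfl
      | cons a t => exact absurd ((h a).mpr (by simp)) (by simp)
    simp [this, PySem.List.min?]
  · rcases h2 : PySem.List.min? l2 (fun x => x) with _ | m2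
    · have : l2 = [] := (PySem.List.min?_eq_none_iff _ _).mp h2
      subst this
      exact absurd ((h m1).mp (PySem.List.min?_mem h1)) (by simp)
    · have hm1 : m1 ∈ l2 := (h m1).mp (PySem.List.min?_mem h1)
      have hm2 : m2 ∈ l1 := (h m2).mpr (PySem.List.min?_mem h2)
      have le1 : m2 ≤ m1 := PySem.List.min?_isMin h2 m1 hm1
      have le2 : m1 ≤ m2 := PySem.List.min?_isMin h1 m2 hm2
      simp [le_antisymm le2 le1]

theorem myfoldl_congr {α β : Type} (f g : β → α → β) (l : List α)
    (h : ∀ x ∈ l, ∀ acc, f acc x = g acc x) : ∀ init, l.foldl f init = l.foldl g init := by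
  induction l with
  | nil => intro init; rfl
  | cons x t ih =>
    intro init
    rw [List.foldl_cons, List.foldl_cons, h x (by simp) init]
    exact ih (fun y hy => h y (by simp [hy])) _

theorem count_eq (d : List (String × String)) (hnd : (d.map Prod.fst).Nodup) :
    pvCountA d = pvCountB d := by
  unfold pvCountA pvCountB
  have h2 : d.foldl (fun (c : Int) (p : String × String) =>
        if (PySem.Dict.mk d).get? p.1 == some "" then c + 1 else c) 0
      = d.foldl (fun (c : Int) (p : String × String) => if p.2 == "" then c + 1 else c) 0 := by
    apply myfoldl_congr
    intro p hp acc
    have hkeys : (PySem.Dict.mk d).keys.Nodup := by simpa using hnd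
    have hitems : (p.1, p.2) ∈ (PySem.Dict.mk d).items := by simpa using hp
    have h := PySem.Dict.get?_of_mem_items _ hitems hkeys
    simp [h]
  rw [h2]
  rw [← List.foldl_map (f := Prod.snd)
    (g := fun (c : Int) (x : String) => if x == "" then c + 1 else c)]
  rw [PySem.List.foldl_beq_add_one, PySem.List.count_eq]
  simp

theorem zipfold (m : Int) (l : List (List (String × String)))
    (res : List (List (String × String))) :
    (l.zip (l.map pvCountB)).foldl
        (fun res dc => if dc.2 == m && !(pyMemD dc.1 res) then res ++ [dc.1] else res) res
      = l.foldl (fun res d => if pvCountB d == m && !(pyMemD d res) then res ++ [d] else res) res := by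
  induction l generalizing res with
  | nil => rfl
  | cons d t ih => simp only [List.map_cons, List.zip_cons_cons, List.foldl_cons]; exact ih _

-- ===== VERDICT (by name: the statement is the Claim_ definition above) =====
theorem max_similitude_coup_spec : Claim_equal_max_similitude_coup := by
  intro ap _ hpre
  obtain ⟨hne, hnd⟩ := hpre
  unfold Spec_max_similitude_coup
  have hcounts : ap.map pvCountB = ap.map pvCountA :=
    List.map_congr_left (fun d hd => (count_eq d (hnd d hd)).symm)
  have hmin : PySem.List.min? (ap.foldl pvStepA PySem.Dict.empty).keys (fun k => k)
      = PySem.List.min? (ap.map pvCountB) (fun x => x) := by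
    rw [hcounts]
    exact min?_eq_of_mem_iff _ _ (fun c => by rw [mem_keys_iff])
  show (match PySem.List.min? (ap.foldl pvStepA PySem.Dict.empty).keys (fun k => k) with
        | none => ([] : List (List (String × String)))
        | some k => (ap.foldl pvStepA PySem.Dict.empty).getD k []) =
       (match PySem.List.min? (ap.map pvCountB) (fun x => x) with
        | none => ([] : List (List (String × String)))
        | some m => (ap.zip (ap.map pvCountB)).foldl
            (fun res dc => if dc.2 == m && !(pyMemD dc.1 res) then res ++ [dc.1] else res) [])
  rw [hmin]
  cases hm : PySem.List.min? (ap.map pvCountB) (fun x => x) with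
  | none => rfl
  | some m =>
    show (ap.foldl pvStepA PySem.Dict.empty).getD m [] =
      (ap.zip (ap.map pvCountB)).foldl
        (fun res dc => if dc.2 == m && !(pyMemD dc.1 res) then res ++ [dc.1] else res) []
    have hmmem : m ∈ ap.map pvCountA := by
      rw [← hcounts]; exact PySem.List.min?_mem hm
    have hget : (ap.foldl pvStepA PySem.Dict.empty).getD m [] = grpF m ap := by
      rw [PySem.Dict.getD_eq_get?_getD, dictInv, if_pos hmmem]; rfl
    rw [hget, zipfold]
    unfold grpF
    exact myfoldl_congr _ _ _ (fun d hd acc => by rw [count_eq d (hnd d hd)]) []
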